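-- pv_equiv track=rewrite | github.com/mt4110/maakie-brainlab | scripts/ops/s29_taxonomy_pipeline_integration.py | build_collection_actions
-- ===== SOURCE A (Python) =====
-- from typing import Any, Dict, List, Tuple
--
-- def build_collection_actions(candidates: List[Dict[str, Any]], max_actions: int) -> List[str]:
--     grouped: Dict[str, int] = {}
--     for row in candidates:
--         tax = str(row.get("suggested_taxonomy") or "unknown")
--         grouped[tax] = int(grouped.get(tax, 0)) + 1
--     actions: List[str] = []
--     for tax, cnt in sorted(grouped.items(), key=lambda x: (-x[1], x[0])):
--         actions.append(f"Collect at least {cnt} additional labeled cases for taxonomy '{tax}'.")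
--     if candidates:
--         actions.append("Promote top unknown candidates to incident triage backlog and assign owner.")
--     return actions[: max(1, int(max_actions))]
-- ===== SOURCE B (Python) =====
-- def build_collection_actions(candidates, max_actions):
--     # Sort the per-row taxonomy keys once, then count consecutive runs
--     # (run-length encoding) instead of accumulating counts in a dict.
--     keys = sorted(str(row.get("suggested_taxonomy") or "unknown") for row in candidates)
--     pairs = []
--     cur, n = None, 0
--     for k in keys:
--         if n and k == cur:
--             n += 1
--         else:
--             if n:
--                 pairs.append((cur, n))
--             cur, n = k, 1
--     if n:
--         pairs.append((cur, n))
--     pairs.sort(key=lambda p: (-p[1], p[0]))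
--     actions = [f"Collect at least {c} additional labeled cases for taxonomy '{t}'." for t, c in pairs]
--     if candidates:
--         actions.append("Promote top unknown candidates to incident triage backlog and assign owner.")
--     return actions[: max(1, int(max_actions))]
-- ===== Notes on version B (the rewrite author's own statement) =====
-- stated objective: alternative
-- what changed: Replaces the dict-accumulator counting with a sort-then-run-length pass: the taxonomy keys are extracted, sorted, and counted by consecutive runs, and the (taxonomy, count) pairs are then sorted by (-count, name); no dictionary is built.
import Mathlib
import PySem

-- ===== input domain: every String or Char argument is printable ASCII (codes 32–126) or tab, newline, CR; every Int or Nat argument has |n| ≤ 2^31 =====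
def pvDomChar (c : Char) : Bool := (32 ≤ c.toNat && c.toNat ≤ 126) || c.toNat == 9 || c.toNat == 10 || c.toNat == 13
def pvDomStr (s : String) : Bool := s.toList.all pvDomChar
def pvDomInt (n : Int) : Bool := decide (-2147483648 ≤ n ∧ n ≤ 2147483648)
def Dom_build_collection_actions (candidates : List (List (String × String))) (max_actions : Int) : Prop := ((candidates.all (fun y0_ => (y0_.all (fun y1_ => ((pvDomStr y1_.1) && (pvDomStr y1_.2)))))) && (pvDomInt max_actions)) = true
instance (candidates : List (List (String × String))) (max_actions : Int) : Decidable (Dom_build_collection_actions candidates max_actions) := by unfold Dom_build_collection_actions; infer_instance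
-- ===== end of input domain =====

-- B replaces A's dict-accumulator counting with a sort-then-run-length pass (alternative
-- decomposition, same results; return value only, neither version mutates its arguments).

-- str(row.get("suggested_taxonomy") or "unknown"): shared key extraction (both Pythons compute it identically)
def pvTax (row : List (String × String)) : String :=
  match (PySem.Dict.mk row).get? "suggested_taxonomy" with
  | none => "unknown"
  | some s => if s = "" then "unknown" else s

-- f"Collect at least {cnt} additional labeled cases for taxonomy '{tax}'."
def pvLine (tax : String) (cnt : Int) : String :=
  "Collect at least " ++ PySem.Int.toStr cnt ++ " additional labeled cases for taxonomy '" ++ tax ++ "'."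

def pvPromote : String := "Promote top unknown candidates to incident triage backlog and assign owner."

-- ===== PORT A =====
def build_collection_actions (candidates : List (List (String × String))) (max_actions : Int) : List String :=
  let grouped : PySem.Dict String Int :=
    candidates.foldl (fun d row =>
      let tax := pvTax row
      d.insert tax (d.getD tax 0 + 1)) PySem.Dict.empty
  let actions : List String :=
    (PySem.List.sorted2 grouped.items (fun x => -x.2) (fun x => x.1)).foldl
      (fun acc p => acc ++ [pvLine p.1 p.2]) []
  let actions := if candidates = [] then actions else actions ++ [pvPromote]
  PySem.List.slice actions none (some (max 1 max_actions))

-- ===== PORT B =====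
-- run-length encoding of the (already sorted) key list: the 'for k in keys' loop of Source B
def pvRunsAux (cur : String) (n : Int) : List String → List (String × Int)
  | [] => [(cur, n)]
  | k :: ks => if k = cur then pvRunsAux cur (n + 1) ks else (cur, n) :: pvRunsAux k 1 ks

def pvRuns : List String → List (String × Int)
  | [] => []
  | k :: ks => pvRunsAux k 1 ks

def build_collection_actions_alt (candidates : List (List (String × String))) (max_actions : Int) : List String :=
  let keys := PySem.List.sorted (candidates.map pvTax) (fun x => x)
  let pairs := pvRuns keys
  let pairs := PySem.List.sorted2 pairs (fun p => -p.2) (fun p => p.1)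
  let actions := pairs.map (fun p => pvLine p.1 p.2)
  let actions := if candidates = [] then actions else actions ++ [pvPromote]
  PySem.List.slice actions none (some (max 1 max_actions))

-- ===== PRECONDITION & SPEC =====
def Spec_build_collection_actions (candidates : List (List (String × String))) (max_actions : Int) (out : List String) : Prop := out = build_collection_actions_alt candidates max_actions
instance (candidates : List (List (String × String))) (max_actions : Int) (out : List String) : Decidable (Spec_build_collection_actions candidates max_actions out) := by unfold Spec_build_collection_actions; infer_instance

-- ===== CLAIM (what is proved, stated in full; the proofs are below) =====
def Claim_equal_build_collection_actions : Prop := ∀ (candidates : List (List (String × String))) (max_actions : Int), Dom_build_collection_actions candidates max_actions → Spec_build_collection_actions candidates max_actions (build_collection_actions candidates max_actions)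

-- ===== LEMMAS AND PROOFS =====

-- the append-in-a-loop shape of A's formatting loop is a map
theorem pv_foldl_append_map {α β : Type} (f : α → β) (l : List α) (acc : List β) :
    l.foldl (fun acc p => acc ++ [f p]) acc = acc ++ l.map f := by
  induction l generalizing acc with
  | nil => simp
  | cons x xs ih => simp [List.foldl_cons, ih]

-- sorted2 with keys (k1, k2) is sorted with the lexicographic key
theorem pv_sorted2_eq_sorted_lex {α : Type} (xs : List α) (k1 : α → Int) (k2 : α → String) :
    PySem.List.sorted2 xs k1 k2 = PySem.List.sorted xs (fun x => toLex (k1 x, k2 x)) := by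
  show List.foldl _ [] xs = List.foldl _ [] xs
  have hb : (fun a b => decide (k1 a < k1 b) || (!decide (k1 b < k1 a) && decide (k2 a < k2 b)))
      = (fun a b => decide (toLex (k1 a, k2 a) < toLex (k1 b, k2 b))) := by
    funext a b
    by_cases h1 : k1 a < k1 b <;> by_cases h2 : k1 b < k1 a <;> by_cases h3 : k1 a = k1 b <;>
      (simp [Prod.Lex.toLex_lt_toLex, h1, h2, h3]; try omega)
  rw [hb]

theorem pv_lexkey_injective :
    Function.Injective (fun p : String × Int => toLex (-p.2, p.1)) := by
  intro p q h
  have h' : ((-p.2, p.1) : Int × String) = (-q.2, q.1) := by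
    have := congrArg (fun x : Lex (Int × String) => ofLex x) h
    simpa using this
  have h1 : -p.2 = -q.2 := congrArg Prod.fst h'
  have h2 : p.1 = q.1 := congrArg Prod.snd h'
  exact Prod.ext_iff.mpr ⟨h2, by omega⟩

-- run-length encoding of a sorted list yields (first occurrence, multiplicity) pairs
theorem pv_runsAux_sorted (s : List String) (cur : String) (n : Int)
    (hs : s.Pairwise (· ≤ ·)) (hcur : ∀ y ∈ s, cur ≤ y) :
    pvRunsAux cur n s
      = (cur, n + (s.count cur : Int))
        :: ((PySem.Set.ofList s).discard cur).map (fun k => (k, (s.count k : Int))) := by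
  induction s generalizing cur n with
  | nil => simp [pvRunsAux, PySem.Set.ofList, PySem.Set.empty, PySem.Set.discard]
  | cons y ys ih =>
    have hy : ∀ z ∈ ys, y ≤ z := (List.pairwise_cons.mp hs).1
    have hys : ys.Pairwise (· ≤ ·) := (List.pairwise_cons.mp hs).2
    by_cases hyc : y = cur
    · subst hyc
      rw [pvRunsAux, if_pos rfl, ih y (n + 1) hys hy, PySem.Set.ofList_cons]
      have hdd : PySem.Set.discard (y :: (PySem.Set.ofList ys).discard y) y
          = (PySem.Set.ofList ys).discard y := by
        show List.filter _ _ = _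
        rw [List.filter_cons_of_neg (by simp)]
        apply List.filter_eq_self.mpr
        intro z hz
        have := ((PySem.Set.mem_discard _ _ _).mp hz).2
        simp [this]
      rw [hdd]
      congr 1
      · have : (y :: ys).count y = ys.count y + 1 := List.count_cons_self
        rw [this]
        refine Prod.ext_iff.mpr ⟨rfl, ?_⟩
        push_cast
        ring
      · apply List.map_congr_left
        intro k hk
        have hne : k ≠ y := ((PySem.Set.mem_discard _ _ _).mp hk).2
        simp [Ne.symm hne]
    · have hcy : cur < y := lt_of_le_of_ne (hcur y (by simp)) (fun h => hyc h.symm)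
      have hnotin : ∀ z ∈ y :: ys, z ≠ cur := by
        intro z hz
        rcases List.mem_cons.mp hz with h | h
        · exact h ▸ hyc
        · exact fun he => absurd (he ▸ hy z h) (not_le.mpr hcy)
      rw [pvRunsAux, if_neg hyc, ih y 1 hys hy, PySem.Set.ofList_cons]
      have hcount0 : (y :: ys).count cur = 0 :=
        List.count_eq_zero.mpr (fun h => hnotin cur h rfl)
      have hdisc : PySem.Set.discard (y :: (PySem.Set.ofList ys).discard y) cur
          = y :: (PySem.Set.ofList ys).discard y := by
        apply List.filter_eq_self.mpr
        intro z hz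
        have hzm : z ∈ y :: ys := by
          rcases List.mem_cons.mp hz with h | h
          · simp [h]
          · exact List.mem_cons_of_mem _ ((PySem.Set.mem_ofList ys z).mp
              (((PySem.Set.mem_discard _ _ _).mp h).1))
        simp [hnotin z hzm]
      rw [hdisc, hcount0, List.map_cons]
      congr 1
      · refine Prod.ext_iff.mpr ⟨rfl, ?_⟩
        simp
      congr 1
      · have : (y :: ys).count y = ys.count y + 1 := List.count_cons_self
        rw [this]
        refine Prod.ext_iff.mpr ⟨rfl, ?_⟩
        push_cast
        ring
      · apply List.map_congr_left
        intro k hk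
        have hne : k ≠ y := ((PySem.Set.mem_discard _ _ _).mp hk).2
        simp [Ne.symm hne]

theorem pv_runs_sorted (s : List String) (hs : s.Pairwise (· ≤ ·)) :
    pvRuns s = (PySem.Set.ofList s).map (fun k => (k, (s.count k : Int))) := by
  cases s with
  | nil => rfl
  | cons y ys =>
    have hy : ∀ z ∈ ys, y ≤ z := (List.pairwise_cons.mp hs).1
    have hys : ys.Pairwise (· ≤ ·) := (List.pairwise_cons.mp hs).2
    rw [pvRuns, pv_runsAux_sorted ys y 1 hys hy, PySem.Set.ofList_cons, List.map_cons]
    refine congrArg₂ _ (by simp; omega) ?_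
    apply List.map_congr_left
    intro k hk
    have hne : k ≠ y := ((PySem.Set.mem_discard _ _ _).mp hk).2
    simp [Ne.symm hne]

-- B's run-length pairs are a permutation of A's counter items
theorem pv_pairs_perm (keys : List String) :
    (pvRuns (PySem.List.sorted keys (fun x => x))).Perm
      ((PySem.Set.ofList keys).map (fun k => (k, (keys.count k : Int)))) := by
  set s := PySem.List.sorted keys (fun x => x) with hsdef
  have hperm : s.Perm keys := PySem.List.sorted_perm keys (fun x => x) false
  have hsorted : s.Pairwise (· ≤ ·) := PySem.List.sorted_pairwise keys (fun x => x)
  rw [pv_runs_sorted s hsorted]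
  have hcnt : (PySem.Set.ofList s).map (fun k => (k, (s.count k : Int)))
      = (PySem.Set.ofList s).map (fun k => (k, (keys.count k : Int))) := by
    apply List.map_congr_left
    intro k _
    simp [hperm.count_eq]
  rw [hcnt]
  apply List.Perm.map
  exact (List.perm_ext_iff_of_nodup (PySem.Set.nodup_ofList s) (PySem.Set.nodup_ofList keys)).mpr
    (fun a => by simp [PySem.Set.mem_ofList, hperm.mem_iff])

-- ===== VERDICT (by name: the statement is the Claim_ definition above) =====
theorem build_collection_actions_spec : Claim_equal_build_collection_actions := by
  intro candidates max_actions _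
  unfold Spec_build_collection_actions build_collection_actions build_collection_actions_alt
  simp only []
  have hgrouped : candidates.foldl (fun d row =>
      let tax := pvTax row
      d.insert tax (d.getD tax 0 + 1)) PySem.Dict.empty
      = PySem.Dict.counter (candidates.map pvTax) := by
    rw [← PySem.Dict.foldl_insert_getD_add_one_eq_counter, List.foldl_map]
  rw [hgrouped]
  have hsorts : PySem.List.sorted2 (PySem.Dict.counter (candidates.map pvTax)).items
        (fun x => -x.2) (fun x => x.1)
      = PySem.List.sorted2 (pvRuns (PySem.List.sorted (candidates.map pvTax) (fun x => x)))
        (fun p => -p.2) (fun p => p.1) := by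
    rw [pv_sorted2_eq_sorted_lex, pv_sorted2_eq_sorted_lex]
    apply PySem.List.sorted_eq_sorted_of_perm _ _ _ pv_lexkey_injective
    rw [PySem.Dict.items_counter]
    exact (pv_pairs_perm (candidates.map pvTax)).symm
  rw [hsorts, pv_foldl_append_map]
  simp
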